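-- pv_equiv track=rewrite | github.com/dfapinov/lah-scanner | src/process/stage2_centre_origin.py | get_order_for_frequency
-- ===== SOURCE A (Python) =====
-- def get_order_for_frequency(f_hz, manual_order_table, target_n_max_origins, N_grid=999):
--     """Returns the order N based on the manual_order_table limits, capped by target_n_max_origins and N_grid."""
--     N_cap = min(target_n_max_origins, N_grid)
--     if not manual_order_table:
--         return N_cap
--     sorted_cuts = sorted(manual_order_table.keys())
--     for cutoff in sorted_cuts:
--         if f_hz <= cutoff:
--             return min(manual_order_table[cutoff], N_cap)
--     return min(manual_order_table[sorted_cuts[-1]], N_cap)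
-- ===== SOURCE B (Python) =====
-- def get_order_for_frequency(f_hz, manual_order_table, target_n_max_origins, N_grid=999):
--     """Pick the order for f_hz by direct min/max aggregation over the cutoff keys (no sort)."""
--     N_cap = min(target_n_max_origins, N_grid)
--     if not manual_order_table:
--         return N_cap
--     matches = [c for c in manual_order_table.keys() if f_hz <= c]
--     chosen = min(matches) if matches else max(manual_order_table.keys())
--     return min(manual_order_table[chosen], N_cap)
-- ===== Notes on version B (the rewrite author's own statement) =====
-- stated objective: faster
-- what changed: Replaces sorting all cutoffs and linearly scanning for the first one >= f_hz with a single-pass min over the matching cutoffs (max of all keys as the fallback), removing the O(k log k) sort entirely.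
import Mathlib
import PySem

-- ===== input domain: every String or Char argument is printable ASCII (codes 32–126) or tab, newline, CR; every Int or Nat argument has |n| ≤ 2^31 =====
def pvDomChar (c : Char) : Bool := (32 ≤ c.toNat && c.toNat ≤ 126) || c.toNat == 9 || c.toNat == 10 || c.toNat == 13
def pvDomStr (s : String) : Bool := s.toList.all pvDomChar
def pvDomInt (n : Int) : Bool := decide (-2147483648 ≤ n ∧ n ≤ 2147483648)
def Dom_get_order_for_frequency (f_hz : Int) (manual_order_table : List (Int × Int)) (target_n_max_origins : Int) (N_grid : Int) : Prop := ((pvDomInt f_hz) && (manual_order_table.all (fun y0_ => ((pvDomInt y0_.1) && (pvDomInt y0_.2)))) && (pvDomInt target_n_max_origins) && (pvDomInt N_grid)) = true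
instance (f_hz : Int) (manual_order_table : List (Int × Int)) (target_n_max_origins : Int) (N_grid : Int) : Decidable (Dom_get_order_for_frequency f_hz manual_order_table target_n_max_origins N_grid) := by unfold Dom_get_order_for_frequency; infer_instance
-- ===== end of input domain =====

-- B replaces A's sort-then-scan by a one-pass min/max aggregation over the cutoff keys (simpler; no sort).

-- ===== PORT A =====
-- A's for-loop over the sorted cutoffs; falls through to sorted_cuts[-1].
def pvScanA (f_hz : Int) (t : List (Int × Int)) (N_cap : Int) (sorted_cuts : List Int) : List Int → Int
  | [] => min (((PySem.Dict.mk t).get? ((PySem.List.pyGet? sorted_cuts (-1)).getD 0)).getD 0) N_cap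
  | c :: rest =>
    if f_hz ≤ c then min (((PySem.Dict.mk t).get? c).getD 0) N_cap
    else pvScanA f_hz t N_cap sorted_cuts rest

def get_order_for_frequency (f_hz : Int) (manual_order_table : List (Int × Int)) (target_n_max_origins : Int) (N_grid : Int) : Int :=
  let N_cap := min target_n_max_origins N_grid
  if manual_order_table = [] then N_cap
  else
    let sorted_cuts := PySem.List.sorted (manual_order_table.map Prod.fst) (fun x => x) false
    pvScanA f_hz manual_order_table N_cap sorted_cuts sorted_cuts

-- ===== PORT B =====
def get_order_for_frequency_alt (f_hz : Int) (manual_order_table : List (Int × Int)) (target_n_max_origins : Int) (N_grid : Int) : Int :=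
  let N_cap := min target_n_max_origins N_grid
  if manual_order_table = [] then N_cap
  else
    let keys := manual_order_table.map Prod.fst
    let matchlist := keys.filter (fun c => f_hz ≤ c)
    let chosen := if matchlist ≠ [] then (PySem.List.min? matchlist (fun x => x)).getD 0
                  else (PySem.List.max? keys (fun x => x)).getD 0
    min (((PySem.Dict.mk manual_order_table).get? chosen).getD 0) N_cap

-- ===== PRECONDITION & SPEC =====
def Spec_get_order_for_frequency (f_hz : Int) (manual_order_table : List (Int × Int)) (target_n_max_origins : Int) (N_grid : Int) (out : Int) : Prop := out = get_order_for_frequency_alt f_hz manual_order_table target_n_max_origins N_grid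
instance (f_hz : Int) (manual_order_table : List (Int × Int)) (target_n_max_origins : Int) (N_grid : Int) (out : Int) : Decidable (Spec_get_order_for_frequency f_hz manual_order_table target_n_max_origins N_grid out) := by unfold Spec_get_order_for_frequency; infer_instance

-- ===== CLAIM (what is proved, stated in full; the proofs are below) =====
def Claim_equal_get_order_for_frequency : Prop := ∀ (f_hz : Int) (manual_order_table : List (Int × Int)) (target_n_max_origins : Int) (N_grid : Int), Dom_get_order_for_frequency f_hz manual_order_table target_n_max_origins N_grid → Spec_get_order_for_frequency f_hz manual_order_table target_n_max_origins N_grid (get_order_for_frequency f_hz manual_order_table target_n_max_origins N_grid)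

-- ===== LEMMAS AND PROOFS =====

-- The scan over a ≤-sorted list returns the branch for the head of the filtered list,
-- or the fallback when nothing matches.
theorem pvScanA_filter (f_hz : Int) (t : List (Int × Int)) (N_cap : Int) (s : List Int)
    (l : List Int) (hl : l.Pairwise (· ≤ ·)) :
    pvScanA f_hz t N_cap s l =
      match l.filter (fun c => decide (f_hz ≤ c)) with
      | [] => min (((PySem.Dict.mk t).get? ((PySem.List.pyGet? s (-1)).getD 0)).getD 0) N_cap
      | c :: _ => min (((PySem.Dict.mk t).get? c).getD 0) N_cap := by
  induction l with
  | nil => simp [pvScanA]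
  | cons c rest ih =>
    rw [List.filter_cons]
    by_cases h : f_hz ≤ c
    · simp [pvScanA, h]
    · rw [if_neg (by simpa using h),
        show pvScanA f_hz t N_cap s (c :: rest) = pvScanA f_hz t N_cap s rest from by
          simp [pvScanA, h]]
      exact ih hl.tail

theorem get_order_for_frequency_eq (f_hz : Int) (manual_order_table : List (Int × Int))
    (target_n_max_origins : Int) (N_grid : Int) :
    get_order_for_frequency f_hz manual_order_table target_n_max_origins N_grid =
      get_order_for_frequency_alt f_hz manual_order_table target_n_max_origins N_grid := by
  unfold get_order_for_frequency get_order_for_frequency_alt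
  by_cases hne : manual_order_table = []
  · simp [hne]
  · simp only [hne, if_false]
    set keys := manual_order_table.map Prod.fst with hkeys
    set s := PySem.List.sorted keys (fun x => x) false with hs
    have hperm : s.Perm keys := PySem.List.sorted_perm keys (fun x => x) false
    have hpair : s.Pairwise (· ≤ ·) := by
      have := PySem.List.sorted_pairwise keys (fun x => x)
      simpa [hs] using this
    have hkne : keys ≠ [] := by
      simp [hkeys, hne]
    have hsne : s ≠ [] := fun h0 => hkne (h0 ▸ hperm : List.Perm [] keys).symm.eq_nil
    rw [pvScanA_filter _ _ _ _ _ hpair]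
    have hfperm : (s.filter (fun c => decide (f_hz ≤ c))).Perm
        (keys.filter (fun c => decide (f_hz ≤ c))) := hperm.filter _
    by_cases hm : keys.filter (fun c => decide (f_hz ≤ c)) = []
    · -- no cutoff matches: fallback uses sorted_cuts[-1] = max of keys
      have hsf : s.filter (fun c => decide (f_hz ≤ c)) = [] := (hm ▸ hfperm).eq_nil
      rw [hsf]
      simp only [hm, ne_eq, not_true_eq_false, if_false]
      -- show (pyGet? s (-1)).getD 0 = (max? keys id).getD 0
      congr 2
      rw [PySem.List.pyGet?_neg_one]
      obtain ⟨M, hM⟩ := Option.ne_none_iff_exists'.mp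
        (fun h => hkne ((PySem.List.max?_eq_none_iff (xs := keys) (key := fun x => x)).mp h))
      rw [hM]
      have hMmem : M ∈ keys := PySem.List.max?_mem hM
      have hMmax : ∀ y ∈ keys, y ≤ M := by
        intro y hy; simpa using PySem.List.max?_isMax hM y hy
      obtain ⟨L, hL⟩ := Option.ne_none_iff_exists'.mp
        (fun h => hsne (List.getLast?_eq_none_iff.mp h))
      rw [hL]
      have hLmem : L ∈ keys := hperm.mem_iff.mp (List.mem_of_getLast? hL)
      have hLmax : ∀ y ∈ s, y ≤ L := by
        intro y hy
        rcases List.getLast?_eq_some_iff.mp hL with ⟨pre, hpre⟩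
        rw [hpre] at hpair hy
        rcases List.mem_append.mp hy with h1 | h1
        · exact (List.pairwise_append.mp hpair).2.2 y h1 L (by simp)
        · simp at h1; simp [h1]
      have : L = M := le_antisymm (hMmax L hLmem) (hLmax M (hperm.mem_iff.mpr hMmem))
      simp [this]
    · -- some cutoff matches: head of sorted filter = min of matches
      obtain ⟨c, restf, hcf⟩ := List.exists_cons_of_ne_nil
        (fun h0 : s.filter (fun c => decide (f_hz ≤ c)) = [] => hm (h0 ▸ hfperm.symm).eq_nil)
      rw [hcf]
      simp only [hm, ne_eq, not_false_eq_true, if_true]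
      congr 2
      obtain ⟨m, hmm⟩ := Option.ne_none_iff_exists'.mp
        (fun h => hm ((PySem.List.min?_eq_none_iff (xs := keys.filter _) (key := fun x => x)).mp h))
      rw [hmm]
      have hmmem : m ∈ keys.filter (fun c => decide (f_hz ≤ c)) := PySem.List.min?_mem hmm
      have hmmin : ∀ y ∈ keys.filter (fun c => decide (f_hz ≤ c)), m ≤ y := by
        intro y hy; simpa using PySem.List.min?_isMin hmm y hy
      have hcmem : c ∈ keys.filter (fun c => decide (f_hz ≤ c)) := by
        rw [← hfperm.mem_iff, hcf]; simp
      have hcmin : ∀ y ∈ s.filter (fun c => decide (f_hz ≤ c)), c ≤ y := by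
        intro y hy
        have hp : (s.filter (fun c => decide (f_hz ≤ c))).Pairwise (· ≤ ·) := hpair.filter _
        rw [hcf] at hp hy
        rcases List.mem_cons.mp hy with h1 | h1
        · simp [h1]
        · exact (List.pairwise_cons.mp hp).1 y h1
      have : c = m := le_antisymm (hcmin m (hfperm.mem_iff.mpr hmmem)) (hmmin c hcmem)
      simp [this]

-- ===== VERDICT (by name: the statement is the Claim_ definition above) =====
theorem get_order_for_frequency_spec : Claim_equal_get_order_for_frequency := by
  intro f_hz t tn Ng _
  unfold Spec_get_order_for_frequency
  exact get_order_for_frequency_eq f_hz t tn Ng
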